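-- pv_equiv track=rewrite | github.com/leehaoun/CalcBlur_Reviewer | main.py | Calc_Percentage
-- ===== SOURCE A (Python) =====
-- def Calc_Percentage(GT_List, Target_List, range):
--     nCount = 0
--     idx_list = []
--     for idx, ((x, y) , size) in enumerate(GT_List):
--         for (x2, y2), size2 in Target_List:
--             if Check_Range(x,x2,range) and Check_Range(y,y2,range) and Check_Range(size,size2, 1):
--                 nCount += 1
--                 idx_list.append(idx)
--                 break
--     return nCount, idx_list
--
-- def Check_Range(source, target, range):
--     if target >= source - range and target <= source + range:
--         return True
--     else: return False
-- ===== SOURCE B (Python) =====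
-- def Calc_Percentage(GT_List, Target_List, range):
--     # Spatial hash: bucket targets by (x//c, y//c, size) cells, c = max(range,1);
--     # each GT point only checks the 3*3*3 neighbouring cells.
--     c = range if range > 1 else 1
--     buckets = {}
--     for (x2, y2), size2 in Target_List:
--         key = (x2 // c, y2 // c, size2)
--         buckets[key] = buckets.get(key, []) + [((x2, y2), size2)]
--     nCount = 0
--     idx_list = []
--     for idx, ((x, y), size) in enumerate(GT_List):
--         cx, cy = x // c, y // c
--         found = any(
--             abs(x2 - x) <= range and abs(y2 - y) <= range and abs(size2 - size) <= 1
--             for dx in (-1, 0, 1)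
--             for dy in (-1, 0, 1)
--             for ds in (-1, 0, 1)
--             for (x2, y2), size2 in buckets.get((cx + dx, cy + dy, size + ds), [])
--         )
--         if found:
--             nCount += 1
--             idx_list.append(idx)
--     return nCount, idx_list
-- ===== Notes on version B (the rewrite author's own statement) =====
-- stated objective: faster
-- what changed: Replaced the nested scan of all targets per GT point by a spatial hash: targets are bucketed once by (x//c, y//c, size) cells with c = max(range,1), and each GT point probes only the 27 neighbouring cells, verifying the exact tolerance condition on the candidates.
import Mathlib
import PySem

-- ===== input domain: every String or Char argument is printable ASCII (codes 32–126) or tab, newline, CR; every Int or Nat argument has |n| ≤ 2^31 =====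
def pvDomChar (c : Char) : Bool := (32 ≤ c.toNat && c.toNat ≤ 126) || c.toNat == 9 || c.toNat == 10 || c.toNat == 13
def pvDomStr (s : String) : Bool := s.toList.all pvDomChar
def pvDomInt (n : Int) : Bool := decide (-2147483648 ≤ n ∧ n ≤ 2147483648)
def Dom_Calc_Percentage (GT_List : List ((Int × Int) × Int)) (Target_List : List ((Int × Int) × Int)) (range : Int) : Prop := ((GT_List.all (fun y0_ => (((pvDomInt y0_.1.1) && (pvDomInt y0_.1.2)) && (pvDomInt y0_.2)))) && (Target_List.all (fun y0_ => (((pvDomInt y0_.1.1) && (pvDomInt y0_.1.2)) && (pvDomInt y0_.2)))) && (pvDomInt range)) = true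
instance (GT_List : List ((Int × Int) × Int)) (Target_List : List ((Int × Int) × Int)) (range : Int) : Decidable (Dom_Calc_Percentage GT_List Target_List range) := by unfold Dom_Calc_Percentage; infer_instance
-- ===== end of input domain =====

-- B replaces A's per-GT scan of all targets by a spatial hash of targets bucketed by (x//c, y//c, size); objective: faster.
-- ===== PORT A =====
def Check_Range (source target range : Int) : Bool :=
  if target ≥ source - range ∧ target ≤ source + range then true else false

-- A's inner 'for … break' loop over Target_List: true iff some target matches
def pvInnerA (x y size range : Int) : List ((Int × Int) × Int) → Bool
  | [] => false
  | ((x2, y2), size2) :: rest =>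
    if Check_Range x x2 range && Check_Range y y2 range && Check_Range size size2 1 then true
    else pvInnerA x y size range rest

def Calc_Percentage (GT_List : List ((Int × Int) × Int)) (Target_List : List ((Int × Int) × Int)) (range : Int) : Int × List Int :=
  (PySem.List.enumerate GT_List 0).foldl
    (fun (st : Int × List Int) p =>
      if pvInnerA p.2.1.1 p.2.1.2 p.2.2 range Target_List then (st.1 + 1, st.2 ++ [p.1]) else st)
    (0, [])

-- ===== PORT B =====
-- B buckets targets by (x//c, y//c, size) with c = max(range, 1); each GT point
-- probes only the 3*3*3 neighbouring cells.
def pvKey (c : Int) (t : (Int × Int) × Int) : Int × Int × Int :=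
  (PySem.Int.floordiv t.1.1 c, PySem.Int.floordiv t.1.2 c, t.2)

def pvBuckets (c : Int) (ts : List ((Int × Int) × Int)) :
    PySem.Dict (Int × Int × Int) (List ((Int × Int) × Int)) :=
  ts.foldl (fun d t => d.modify (pvKey c t) [] (· ++ [t])) PySem.Dict.empty

def pvMatchB (x y size range : Int) (t : (Int × Int) × Int) : Bool :=
  decide (|t.1.1 - x| ≤ range) && decide (|t.1.2 - y| ≤ range) && decide (|t.2 - size| ≤ 1)

-- the 'found = any(… for dx … for dy … for ds … for t in bucket)' comprehension
def pvFound (buckets : PySem.Dict (Int × Int × Int) (List ((Int × Int) × Int)))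
    (range x y size c : Int) : Bool :=
  [(-1 : Int), 0, 1].any fun dx => [(-1 : Int), 0, 1].any fun dy => [(-1 : Int), 0, 1].any fun ds =>
    (buckets.getD (PySem.Int.floordiv x c + dx, PySem.Int.floordiv y c + dy, size + ds) []).any
      (pvMatchB x y size range)

def Calc_Percentage_alt (GT_List : List ((Int × Int) × Int)) (Target_List : List ((Int × Int) × Int)) (range : Int) : Int × List Int :=
  let c := if range > 1 then range else 1
  let buckets := pvBuckets c Target_List
  (PySem.List.enumerate GT_List 0).foldl
    (fun (st : Int × List Int) p =>
      if pvFound buckets range p.2.1.1 p.2.1.2 p.2.2 c then (st.1 + 1, st.2 ++ [p.1]) else st)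
    (0, [])

-- ===== PRECONDITION & SPEC =====
def Spec_Calc_Percentage (GT_List : List ((Int × Int) × Int)) (Target_List : List ((Int × Int) × Int)) (range : Int) (out : Int × List Int) : Prop := out = Calc_Percentage_alt GT_List Target_List range
instance (GT_List : List ((Int × Int) × Int)) (Target_List : List ((Int × Int) × Int)) (range : Int) (out : Int × List Int) : Decidable (Spec_Calc_Percentage GT_List Target_List range out) := by unfold Spec_Calc_Percentage; infer_instance

-- ===== CLAIM (what is proved, stated in full; the proofs are below) =====
def Claim_equal_Calc_Percentage : Prop := ∀ (GT_List : List ((Int × Int) × Int)) (Target_List : List ((Int × Int) × Int)) (range : Int), Dom_Calc_Percentage GT_List Target_List range → Spec_Calc_Percentage GT_List Target_List range (Calc_Percentage GT_List Target_List range)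

-- ===== LEMMAS AND PROOFS =====
-- A's predicate on one target
def pvMatchA (x y size range : Int) (t : (Int × Int) × Int) : Bool :=
  Check_Range x t.1.1 range && Check_Range y t.1.2 range && Check_Range size t.2 1

lemma pvInnerA_eq_any (x y size range : Int) (ts : List ((Int × Int) × Int)) :
    pvInnerA x y size range ts = ts.any (pvMatchA x y size range) := by
  induction ts with
  | nil => rfl
  | cons t rest ih =>
    obtain ⟨⟨x2, y2⟩, s2⟩ := t
    simp only [pvInnerA, List.any_cons, pvMatchA]
    split_ifs with h <;> simp [h, ih]

lemma pvMatchA_eq_matchB (x y size range : Int) (t : (Int × Int) × Int) :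
    pvMatchA x y size range t = pvMatchB x y size range t := by
  rw [Bool.eq_iff_iff]
  simp [pvMatchA, pvMatchB, Check_Range, abs_le]
  omega

lemma pv_fdiv_bound (c a b : Int) (hc : 0 < c) (h1 : a - c ≤ b) (h2 : b ≤ a + c) :
    PySem.Int.floordiv a c - 1 ≤ PySem.Int.floordiv b c ∧
    PySem.Int.floordiv b c ≤ PySem.Int.floordiv a c + 1 := by
  rw [PySem.Int.floordiv_eq_ediv_of_pos hc, PySem.Int.floordiv_eq_ediv_of_pos hc]
  have hne : c ≠ 0 := by omega
  have e1 : (a - c) / c = a / c + (-1) := by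
    have := Int.add_mul_ediv_right a (-1) hne
    simpa [sub_eq_add_neg] using this
  have e2 : (a + c) / c = a / c + 1 := by
    have := Int.add_mul_ediv_right a 1 hne
    simpa using this
  have l1 := Int.ediv_le_ediv hc h1
  have l2 := Int.ediv_le_ediv hc h2
  omega

lemma pvBuckets_getD (c : Int) (ts : List ((Int × Int) × Int)) (k : Int × Int × Int) :
    (pvBuckets c ts).getD k [] = ts.filter (fun t => pvKey c t == k) := by
  unfold pvBuckets
  have hmap : ts.foldl (fun d t => d.modify (pvKey c t) [] (· ++ [t])) PySem.Dict.empty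
      = (ts.map (fun t => (pvKey c t, t))).foldl (fun d p => d.modify p.1 [] (· ++ [p.2])) PySem.Dict.empty := by
    rw [List.foldl_map]
  rw [hmap, PySem.Dict.getD_foldl_modify_append, PySem.Dict.getD_empty]
  rw [List.filter_map]
  simp [List.map_map, Function.comp_def]

lemma pv_mem_delta (d : Int) (h1 : -1 ≤ d) (h2 : d ≤ 1) : d ∈ [(-1 : Int), 0, 1] := by
  have : d = -1 ∨ d = 0 ∨ d = 1 := by omega
  rcases this with h | h | h <;> simp [h]

lemma pvFound_eq_any (range x y size c : Int) (hc : 0 < c) (hrc : range ≤ c)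
    (ts : List ((Int × Int) × Int)) :
    pvFound (pvBuckets c ts) range x y size c = ts.any (pvMatchB x y size range) := by
  rw [Bool.eq_iff_iff]
  simp only [pvFound, List.any_eq_true, pvBuckets_getD, List.mem_filter, beq_iff_eq]
  constructor
  · rintro ⟨dx, _, dy, _, ds, _, t, ⟨ht, _⟩, hm⟩
    exact ⟨t, ht, hm⟩
  · rintro ⟨t, ht, hm⟩
    obtain ⟨⟨x2, y2⟩, s2⟩ := t
    simp only [pvMatchB, Bool.and_eq_true, decide_eq_true_eq, abs_le] at hm
    obtain ⟨⟨hx, hy⟩, hs⟩ := hm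
    have hbx := pv_fdiv_bound c x x2 hc (by omega) (by omega)
    have hby := pv_fdiv_bound c y y2 hc (by omega) (by omega)
    refine ⟨PySem.Int.floordiv x2 c - PySem.Int.floordiv x c,
      pv_mem_delta _ (by omega) (by omega),
      PySem.Int.floordiv y2 c - PySem.Int.floordiv y c,
      pv_mem_delta _ (by omega) (by omega),
      s2 - size, pv_mem_delta _ (by omega) (by omega),
      ((x2, y2), s2), ⟨ht, ?_⟩, ?_⟩
    · simp only [pvKey, Prod.mk.injEq]
      refine ⟨by omega, by omega, by omega⟩
    · simp [pvMatchB, abs_le]; omega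

theorem pv_main (GT_List Target_List : List ((Int × Int) × Int)) (range : Int) :
    Calc_Percentage GT_List Target_List range = Calc_Percentage_alt GT_List Target_List range := by
  unfold Calc_Percentage Calc_Percentage_alt
  have hc : (0 : Int) < (if range > 1 then range else 1) := by split <;> omega
  have hrc : range ≤ (if range > 1 then range else 1) := by split <;> omega
  have hstep : (fun (st : Int × List Int) (p : Int × ((Int × Int) × Int)) =>
      if pvInnerA p.2.1.1 p.2.1.2 p.2.2 range Target_List then (st.1 + 1, st.2 ++ [p.1]) else st)
    = (fun (st : Int × List Int) p =>
      if pvFound (pvBuckets (if range > 1 then range else 1) Target_List) range p.2.1.1 p.2.1.2 p.2.2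
          (if range > 1 then range else 1) then (st.1 + 1, st.2 ++ [p.1]) else st) := by
    funext st p
    rw [pvInnerA_eq_any, pvFound_eq_any _ _ _ _ _ hc hrc,
      show pvMatchA p.2.1.1 p.2.1.2 p.2.2 range = pvMatchB p.2.1.1 p.2.1.2 p.2.2 range from
        funext (pvMatchA_eq_matchB p.2.1.1 p.2.1.2 p.2.2 range)]
  rw [hstep]

-- ===== VERDICT (by name: the statement is the Claim_ definition above) =====
theorem Calc_Percentage_spec : Claim_equal_Calc_Percentage := by
  intro GT_List Target_List range _
  unfold Spec_Calc_Percentage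
  exact pv_main GT_List Target_List range
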